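-- pv_equiv track=rewrite | github.com/shayrm/python_and_ctf | translation.py | trans_g
-- ===== SOURCE A (Python) =====
-- def trans_g(phrase):
--     # translate = "AEIOUaeiou" if not using the letter.lower()
--     translate = "aeiou"
--     translation = ""
--     for letter in phrase:
--         if letter.lower() in translate:
--             if letter.isupper():
--                 translation = translation + "G"
--             else:
--                 translation = translation + "g"
--         else:
--             translation = translation + letter
--     return translation
-- ===== SOURCE B (Python) =====
-- def trans_g(phrase):
--     return phrase.translate(str.maketrans("AEIOUaeiou", "GGGGGggggg"))
-- ===== Notes on version B (the rewrite author's own statement) =====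
-- stated objective: idiomatic
-- what changed: Replaces the explicit per-character loop with its membership test, isupper() branch and quadratic string concatenation by a translation table built once with str.maketrans and a single phrase.translate call.
import Mathlib
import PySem

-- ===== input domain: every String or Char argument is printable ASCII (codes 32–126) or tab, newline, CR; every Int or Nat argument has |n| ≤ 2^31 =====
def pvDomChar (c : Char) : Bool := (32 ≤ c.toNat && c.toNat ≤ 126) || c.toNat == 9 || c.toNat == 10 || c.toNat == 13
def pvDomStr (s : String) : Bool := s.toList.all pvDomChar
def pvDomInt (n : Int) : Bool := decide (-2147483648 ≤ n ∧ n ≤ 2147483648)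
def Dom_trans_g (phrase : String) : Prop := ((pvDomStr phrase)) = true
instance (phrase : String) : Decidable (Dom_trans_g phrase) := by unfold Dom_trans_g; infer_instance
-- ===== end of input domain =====

-- B replaces A's per-character loop (membership test + isupper branch) by a precomputed
-- translation table applied in one table-driven pass (str.maketrans/translate); idiomatic, measured faster.


-- ===== PORT A =====
def trans_g (phrase : String) : String :=
  String.ofList (phrase.toList.foldl (fun translation letter =>
    if (['a', 'e', 'i', 'o', 'u'] : List Char).contains (PySem.Chars.lowerChar letter) then
      if PySem.Chars.isupper letter then translation ++ ['G'] else translation ++ ['g']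
    else translation ++ [letter]) [])

-- ===== PORT B =====
-- the table str.maketrans("AEIOUaeiou", "GGGGGggggg") builds, as an association list
def pvTransTable : List (Char × Char) :=
  [('A', 'G'), ('E', 'G'), ('I', 'G'), ('O', 'G'), ('U', 'G'),
   ('a', 'g'), ('e', 'g'), ('i', 'g'), ('o', 'g'), ('u', 'g')]

-- phrase.translate(table): each char is replaced by its table entry, chars without one are kept
def trans_g_alt (phrase : String) : String :=
  String.ofList (phrase.toList.map (fun c => (pvTransTable.lookup c).getD c))

-- ===== PRECONDITION & SPEC =====
def Spec_trans_g (phrase : String) (out : String) : Prop := out = trans_g_alt phrase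
instance (phrase : String) (out : String) : Decidable (Spec_trans_g phrase out) := by unfold Spec_trans_g; infer_instance

-- ===== CLAIM (what is proved, stated in full; the proofs are below) =====
def Claim_equal_trans_g : Prop := ∀ (phrase : String), Dom_trans_g phrase → Spec_trans_g phrase (trans_g phrase)

-- ===== LEMMAS AND PROOFS =====

-- A's per-character branch computes exactly B's table lookup, for every Char
lemma pv_step_eq (c : Char) :
    (if (['a', 'e', 'i', 'o', 'u'] : List Char).contains (PySem.Chars.lowerChar c) then
      (if PySem.Chars.isupper c then 'G' else 'g') else c)
    = (pvTransTable.lookup c).getD c := by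
  by_cases h : c ∈ (['A', 'E', 'I', 'O', 'U', 'a', 'e', 'i', 'o', 'u'] : List Char)
  · fin_cases h <;> decide
  · simp only [List.mem_cons, List.not_mem_nil, or_false, not_or] at h
    obtain ⟨hA, hE, hI, hO, hU, ha, he, hi, ho, hu⟩ := h
    have hlook : pvTransTable.lookup c = none := by
      simp only [pvTransTable, List.lookup,
        beq_eq_false_iff_ne.mpr hA, beq_eq_false_iff_ne.mpr hE, beq_eq_false_iff_ne.mpr hI,
        beq_eq_false_iff_ne.mpr hO, beq_eq_false_iff_ne.mpr hU, beq_eq_false_iff_ne.mpr ha,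
        beq_eq_false_iff_ne.mpr he, beq_eq_false_iff_ne.mpr hi, beq_eq_false_iff_ne.mpr ho,
        beq_eq_false_iff_ne.mpr hu]
    have hcontains : (['a', 'e', 'i', 'o', 'u'] : List Char).contains
        (PySem.Chars.lowerChar c) = false := by
      unfold PySem.Chars.lowerChar PySem.Chars.isupper
      split_ifs with hup
      · -- c is an ASCII uppercase letter; its lowercase is a vowel only if c was one
        simp only [Bool.and_eq_true, decide_eq_true_eq] at hup
        have h65 : (65 : Nat) ≤ c.toNat := hup.1
        have h90 : c.toNat ≤ 90 := hup.2
        have hval : (c.toNat + 32).isValidChar := by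
          constructor; omega
        have htn : (Char.ofNat (c.toNat + 32)).toNat = c.toNat + 32 := by
          rw [Char.toNat_ofNat, if_pos hval]
        simp only [List.contains_eq_mem, List.mem_cons, List.not_mem_nil, or_false,
          decide_eq_false_iff_not, not_or]
        have key : ∀ v : Char, Char.ofNat (c.toNat + 32) = v → c.toNat = v.toNat - 32 := by
          intro v hc
          have h2 := congrArg Char.toNat hc
          rw [htn] at h2
          omega
        refine ⟨fun hc => hA ?_, fun hc => hE ?_, fun hc => hI ?_,
                fun hc => hO ?_, fun hc => hU ?_⟩ <;>
          · have h2 := key _ hc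
            norm_num at h2
            rw [← Char.ofNat_toNat c, h2]
            rfl
      · simp only [List.contains_eq_mem, List.mem_cons, List.not_mem_nil, or_false,
          decide_eq_false_iff_not, not_or]
        exact ⟨ha, he, hi, ho, hu⟩
    rw [hcontains, hlook]
    simp
-- A's append-accumulating fold is the map of the per-character step
lemma pv_fold_eq (l acc : List Char) :
    (l.foldl (fun translation letter =>
      if (['a', 'e', 'i', 'o', 'u'] : List Char).contains (PySem.Chars.lowerChar letter) then
        if PySem.Chars.isupper letter then translation ++ ['G'] else translation ++ ['g']
      else translation ++ [letter]) acc)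
    = acc ++ l.map (fun c => (pvTransTable.lookup c).getD c) := by
  induction l generalizing acc with
  | nil => simp
  | cons c l ih =>
    rw [List.foldl_cons, List.map_cons, ih, ← pv_step_eq c]
    split_ifs <;> simp

-- ===== VERDICT (by name: the statement is the Claim_ definition above) =====
theorem trans_g_spec : Claim_equal_trans_g := by
  intro phrase _
  show _ = _
  unfold trans_g trans_g_alt
  rw [pv_fold_eq]
  simp
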